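-- pv_equiv track=rewrite | github.com/SaltedFish-No1/TLSscan | modules/scanning/http_scanner.py | parse_security_headers
-- ===== SOURCE A (Python) =====
-- def parse_security_headers(headers, protocol):
--     """
--     Parse security-related headers from the response headers.
--     """
--     hsts_enabled = False
--     hsts_max_age = None
--     hsts_preloaded = False
--     csp = None
--     x_frame_options = None
--     x_content_type_options = False
--     x_xss_protection = False
--     referrer_policy = None
--     permissions_policy = None
--
--     for header_name, header_value in headers.items():
--         header_name_lower = header_name.lower()
--
--         if header_name_lower == 'strict-transport-security' and protocol == 'https':
--             hsts_enabled = True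
--             # Extract max-age value
--             parts = header_value.split(';')
--             for part in parts:
--                 if 'max-age' in part.lower():
--                     try:
--                         hsts_max_age = int(part.split('=')[1])
--                     except ValueError:
--                         hsts_max_age = None
--                 if 'preload' in part.lower():
--                     hsts_preloaded = True
--
--         elif header_name_lower == 'content-security-policy':
--             csp = header_value
--
--         elif header_name_lower == 'x-frame-options':
--             x_frame_options = header_value
--
--         elif header_name_lower == 'x-content-type-options':
--             if 'nosniff' in header_value.lower():
--                 x_content_type_options = True
--
--         elif header_name_lower == 'x-xss-protection':
--             if '1; mode=block' in header_value.lower():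
--                 x_xss_protection = True
--
--         elif header_name_lower == 'referrer-policy':
--             referrer_policy = header_value
--
--         elif header_name_lower == 'permissions-policy':
--             permissions_policy = header_value
--
--     return (hsts_enabled, hsts_max_age, hsts_preloaded, csp, x_frame_options,
--             x_content_type_options, x_xss_protection, referrer_policy, permissions_policy)
-- ===== SOURCE B (Python) =====
-- def parse_security_headers(headers, protocol):
--     """
--     Parse security-related headers from the response headers.
--     Per-field lookup: each field scans the headers for its own name.
--     """
--     def find(name):
--         for n, v in headers.items():
--             if n.lower() == name:
--                 return v
--         return None
--
--     hsts_enabled = False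
--     hsts_max_age = None
--     hsts_preloaded = False
--     sts = find('strict-transport-security')
--     if sts is not None and protocol == 'https':
--         hsts_enabled = True
--         for part in sts.split(';'):
--             if 'max-age' in part.lower():
--                 try:
--                     hsts_max_age = int(part.split('=')[1])
--                 except ValueError:
--                     hsts_max_age = None
--             if 'preload' in part.lower():
--                 hsts_preloaded = True
--
--     xcto = find('x-content-type-options')
--     xxss = find('x-xss-protection')
--     return (
--         hsts_enabled,
--         hsts_max_age,
--         hsts_preloaded,
--         find('content-security-policy'),
--         find('x-frame-options'),
--         'nosniff' in (xcto or '').lower(),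
--         '1; mode=block' in (xxss or '').lower(),
--         find('referrer-policy'),
--         find('permissions-policy'),
--     )
-- ===== Notes on version B (the rewrite author's own statement) =====
-- stated objective: alternative
-- what changed: B inverts the traversal: instead of A's single pass over the headers with a nine-way if/elif dispatch updating nine accumulators, B loops over the known fields, each field performing its own scan of the headers via a find(name) helper, with no shared accumulator state.
-- outside the precondition, e.g. on parse_security_headers({'Strict-Transport-Security': 'max-age'}, 'https'): A raises IndexError, B raises IndexError
import Mathlib
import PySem

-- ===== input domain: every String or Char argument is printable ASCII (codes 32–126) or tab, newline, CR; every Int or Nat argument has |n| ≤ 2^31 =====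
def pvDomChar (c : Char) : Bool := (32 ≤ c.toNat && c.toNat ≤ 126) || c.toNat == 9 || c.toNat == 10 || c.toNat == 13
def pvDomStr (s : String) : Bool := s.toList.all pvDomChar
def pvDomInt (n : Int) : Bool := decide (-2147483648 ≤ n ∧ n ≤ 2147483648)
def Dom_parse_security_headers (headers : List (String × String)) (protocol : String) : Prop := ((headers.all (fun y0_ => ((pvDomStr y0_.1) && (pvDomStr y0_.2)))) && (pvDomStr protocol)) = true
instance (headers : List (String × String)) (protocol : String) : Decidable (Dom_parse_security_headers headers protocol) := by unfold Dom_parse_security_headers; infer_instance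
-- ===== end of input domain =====

-- B inverts the traversal: each security field does its own scan of the headers (a find-by-name
-- helper per field) instead of A's single dispatch pass over nine accumulators; same cost, no speed claim.


-- ===== PORT A =====
-- one ';'-part of the Strict-Transport-Security value of A's inner loop
def stsPartStep (st : Option Int × Bool) (part : String) : Option Int × Bool :=
  let pl := PySem.Str.lower part
  let ma := if PySem.Str.isIn "max-age" pl then
      -- part.split('=')[1] then int(...); pyGet? 1 = none is Python's uncaught IndexError (excluded by Pre_),
      -- ofStr? = none is the caught ValueError (hsts_max_age = None)
      (PySem.List.pyGet? ((PySem.Str.split? part "=").getD []) 1).bind PySem.Int.ofStr?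
    else st.1
  let pre := if PySem.Str.isIn "preload" pl then true else st.2
  (ma, pre)

def aStep (protocol : String)
    (st : Bool × Option Int × Bool × Option String × Option String × Bool × Bool × Option String × Option String)
    (hp : String × String) :
    Bool × Option Int × Bool × Option String × Option String × Bool × Bool × Option String × Option String :=
  match st with
  | (he, ma, pre, csp, xfo, xcto, xxss, rp, pp) =>
    let nl := PySem.Str.lower hp.1
    if nl == "strict-transport-security" && protocol == "https" then
      let r := ((PySem.Str.split? hp.2 ";").getD []).foldl stsPartStep (ma, pre)
      (true, r.1, r.2, csp, xfo, xcto, xxss, rp, pp)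
    else if nl == "content-security-policy" then (he, ma, pre, some hp.2, xfo, xcto, xxss, rp, pp)
    else if nl == "x-frame-options" then (he, ma, pre, csp, some hp.2, xcto, xxss, rp, pp)
    else if nl == "x-content-type-options" then
      (he, ma, pre, csp, xfo, (if PySem.Str.isIn "nosniff" (PySem.Str.lower hp.2) then true else xcto), xxss, rp, pp)
    else if nl == "x-xss-protection" then
      (he, ma, pre, csp, xfo, xcto, (if PySem.Str.isIn "1; mode=block" (PySem.Str.lower hp.2) then true else xxss), rp, pp)
    else if nl == "referrer-policy" then (he, ma, pre, csp, xfo, xcto, xxss, some hp.2, pp)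
    else if nl == "permissions-policy" then (he, ma, pre, csp, xfo, xcto, xxss, rp, some hp.2)
    else (he, ma, pre, csp, xfo, xcto, xxss, rp, pp)

def parse_security_headers (headers : List (String × String)) (protocol : String) : Bool × Option Int × Bool × Option String × Option String × Bool × Bool × Option String × Option String :=
  headers.foldl (aStep protocol) (false, none, false, none, none, false, false, none, none)

-- ===== PORT B =====
-- B's find(name): first header whose lowercased name equals name
def findHdr (headers : List (String × String)) (name : String) : Option String :=
  match headers with
  | [] => none
  | p :: t => if PySem.Str.lower p.1 == name then some p.2 else findHdr t name

def parse_security_headers_alt (headers : List (String × String)) (protocol : String) : Bool × Option Int × Bool × Option String × Option String × Bool × Bool × Option String × Option String :=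
  let hsts : Bool × Option Int × Bool :=
    match findHdr headers "strict-transport-security" with
    | some sts =>
      if protocol == "https" then
        let r := ((PySem.Str.split? sts ";").getD []).foldl (fun st part =>
          ((if PySem.Str.isIn "max-age" (PySem.Str.lower part) then
              (PySem.List.pyGet? ((PySem.Str.split? part "=").getD []) 1).bind PySem.Int.ofStr?
            else st.1),
           (if PySem.Str.isIn "preload" (PySem.Str.lower part) then true else st.2))) (none, false)
        (true, r.1, r.2)
      else (false, none, false)
    | none => (false, none, false)
  (hsts.1, hsts.2.1, hsts.2.2,
   findHdr headers "content-security-policy",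
   findHdr headers "x-frame-options",
   PySem.Str.isIn "nosniff" (PySem.Str.lower ((findHdr headers "x-content-type-options").getD "")),
   PySem.Str.isIn "1; mode=block" (PySem.Str.lower ((findHdr headers "x-xss-protection").getD "")),
   findHdr headers "referrer-policy",
   findHdr headers "permissions-policy")

-- ===== PRECONDITION & SPEC =====
-- Pre_ excludes (a) header lists in which two names coincide after lowercasing — a duplicate-key corner
-- where A's sticky/overwrite accumulation across the case-duplicates is accidental and B's first-match
-- scan is equally defensible — and (b) HSTS values (under https) with a ';'-part containing 'max-age'
-- but no '=', on which A raises an uncaught IndexError (B raises there too).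
def Pre_parse_security_headers (headers : List (String × String)) (protocol : String) : Prop :=
  (headers.map (fun p => PySem.Str.lower p.1)).Nodup ∧
  ∀ p ∈ headers, PySem.Str.lower p.1 = "strict-transport-security" → protocol = "https" →
    ∀ part ∈ (PySem.Str.split? p.2 ";").getD [],
      PySem.Str.isIn "max-age" (PySem.Str.lower part) = true →
      1 < ((PySem.Str.split? part "=").getD []).length

instance (headers : List (String × String)) (protocol : String) : Decidable (Pre_parse_security_headers headers protocol) := by unfold Pre_parse_security_headers; infer_instance

def pvWitness_parse_security_headers : (List (String × String)) × String :=
  ([("Strict-Transport-Security", "max-age=60; preload"), ("X-Content-Type-Options", "nosniff")], "https")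

def Spec_parse_security_headers (headers : List (String × String)) (protocol : String) (out : Bool × Option Int × Bool × Option String × Option String × Bool × Bool × Option String × Option String) : Prop := out = parse_security_headers_alt headers protocol
instance (headers : List (String × String)) (protocol : String) (out : Bool × Option Int × Bool × Option String × Option String × Bool × Bool × Option String × Option String) : Decidable (Spec_parse_security_headers headers protocol out) := by
  unfold Spec_parse_security_headers
  refine @instDecidableEqProd _ _ ?_ (@instDecidableEqProd _ _ ?_ (@instDecidableEqProd _ _ ?_ (@instDecidableEqProd _ _ ?_ ?_))) out (parse_security_headers_alt headers protocol) <;> infer_instance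

-- ===== CLAIM =====
def Claim_equal_parse_security_headers : Prop := ∀ (headers : List (String × String)) (protocol : String), Dom_parse_security_headers headers protocol → Pre_parse_security_headers headers protocol → Spec_parse_security_headers headers protocol (parse_security_headers headers protocol)

-- ===== LEMMAS AND PROOFS =====

theorem findHdr_eq_none_of_not_mem (hs : List (String × String)) (k : String)
    (hk : k ∉ hs.map (fun p => PySem.Str.lower p.1)) : findHdr hs k = none := by
  induction hs with
  | nil => rfl
  | cons a t ih =>
    simp only [List.map_cons, List.mem_cons, not_or] at hk
    have hc : (PySem.Str.lower a.1 == k) = false := beq_eq_false_iff_ne.mpr (fun h => hk.1 h.symm)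
    simp [findHdr, hc, ih hk.2]

theorem findHdr_append (hs : List (String × String)) (p : String × String) (k : String) :
    findHdr (hs ++ [p]) k =
      match findHdr hs k with
      | some v => some v
      | none => if PySem.Str.lower p.1 == k then some p.2 else none := by
  induction hs with
  | nil => rfl
  | cons a t ih =>
    simp only [List.cons_append, findHdr]
    by_cases h : PySem.Str.lower a.1 == k
    · simp [h]
    · simp [h, ih]

theorem main_equiv (headers : List (String × String)) (protocol : String)
    (hnd : (headers.map (fun p => PySem.Str.lower p.1)).Nodup) :
    parse_security_headers headers protocol = parse_security_headers_alt headers protocol := by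
  induction headers using List.reverseRecOn with
  | nil => rfl
  | append_singleton hs p ih =>
    have hnd' : (hs.map (fun p => PySem.Str.lower p.1)).Nodup := by
      have := hnd; simp only [List.map_append, List.map_cons, List.map_nil] at this
      exact (List.nodup_append.mp this).1
    have hfresh : PySem.Str.lower p.1 ∉ hs.map (fun p => PySem.Str.lower p.1) := by
      have h := hnd; simp only [List.map_append, List.map_cons, List.map_nil] at h
      rcases List.nodup_append.mp h with ⟨-, -, hdisj⟩
      intro hmem
      exact hdisj _ hmem _ (List.mem_singleton.mpr rfl) rfl
    have ihe := ih hnd'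
    have hA : parse_security_headers (hs ++ [p]) protocol
        = aStep protocol (parse_security_headers hs protocol) p := by
      simp [parse_security_headers, List.foldl_append]
    have hgetfresh : findHdr hs (PySem.Str.lower p.1) = none :=
      findHdr_eq_none_of_not_mem hs _ hfresh
    have hget : ∀ k, findHdr (hs ++ [p]) k
        = if k = PySem.Str.lower p.1 then some p.2 else findHdr hs k := by
      intro k
      rw [findHdr_append]
      by_cases hk : k = PySem.Str.lower p.1
      · subst hk; rw [hgetfresh]; simp
      · rw [if_neg hk]
        cases hfind : findHdr hs k with
        | some v => rfl
        | none => simp [show (PySem.Str.lower p.1 == k) = false by simpa using fun h => hk h.symm]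
    rw [hA, ihe]
    by_cases h1 : PySem.Str.lower p.1 = "strict-transport-security"
    · rw [h1] at hgetfresh
      by_cases hp2 : protocol = "https"
      · have hstep : (fun (st : Option Int × Bool) (part : String) =>
            ((if PySem.Str.isIn "max-age" (PySem.Str.lower part) then
                (PySem.List.pyGet? ((PySem.Str.split? part "=").getD []) 1).bind PySem.Int.ofStr?
              else st.1),
             (if PySem.Str.isIn "preload" (PySem.Str.lower part) then true else st.2))) = stsPartStep := by
          funext st part
          rfl
        simp only [parse_security_headers_alt, hstep]
        simp [aStep, hget, h1, hp2, hgetfresh]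
      · simp [parse_security_headers_alt, aStep, hget, h1, hp2, hgetfresh]
    · by_cases h2 : PySem.Str.lower p.1 = "content-security-policy"
      · simp [parse_security_headers_alt, aStep, hget, h2]
      · by_cases h3 : PySem.Str.lower p.1 = "x-frame-options"
        · simp [parse_security_headers_alt, aStep, hget, h3]
        · by_cases h4 : PySem.Str.lower p.1 = "x-content-type-options"
          · rw [h4] at hgetfresh
            simp [parse_security_headers_alt, aStep, hget, h4, hgetfresh]
            exact fun h => absurd h (by decide)
          · by_cases h5 : PySem.Str.lower p.1 = "x-xss-protection"
            · rw [h5] at hgetfresh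
              simp [parse_security_headers_alt, aStep, hget, h5, hgetfresh]
              exact fun h => absurd h (by decide)
            · by_cases h6 : PySem.Str.lower p.1 = "referrer-policy"
              · simp [parse_security_headers_alt, aStep, hget, h6]
              · by_cases h7 : PySem.Str.lower p.1 = "permissions-policy"
                · simp [parse_security_headers_alt, aStep, hget, h7]
                · have n1 : ("strict-transport-security" = PySem.Str.lower p.1) = False := eq_false fun h => h1 (Eq.symm h)
                  have n2 : ("content-security-policy" = PySem.Str.lower p.1) = False := eq_false fun h => h2 (Eq.symm h)
                  have n3 : ("x-frame-options" = PySem.Str.lower p.1) = False := eq_false fun h => h3 (Eq.symm h)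
                  have n4 : ("x-content-type-options" = PySem.Str.lower p.1) = False := eq_false fun h => h4 (Eq.symm h)
                  have n5 : ("x-xss-protection" = PySem.Str.lower p.1) = False := eq_false fun h => h5 (Eq.symm h)
                  have n6 : ("referrer-policy" = PySem.Str.lower p.1) = False := eq_false fun h => h6 (Eq.symm h)
                  have n7 : ("permissions-policy" = PySem.Str.lower p.1) = False := eq_false fun h => h7 (Eq.symm h)
                  simp [parse_security_headers_alt, aStep, hget, h1, h2, h3, h4, h5, h6, h7,
                    n1, n2, n3, n4, n5, n6, n7]

-- ===== VERDICT =====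
theorem parse_security_headers_spec : Claim_equal_parse_security_headers := by
  intro headers protocol _ hpre
  exact main_equiv headers protocol hpre.1
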